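-- pv_equiv track=rewrite | github.com/ThisIsBad/noesis | services/logos/src/logos/orchestrator.py | _tokenize_rule
-- ===== SOURCE A (Python) =====
-- def _tokenize_rule(rule: str) -> list[str]:
--     tokens: list[str] = []
--     current: list[str] = []
--     for char in rule:
--         if char.isspace():
--             if current:
--                 tokens.append("".join(current))
--                 current.clear()
--             continue
--         if char in {"(", ")"}:
--             if current:
--                 tokens.append("".join(current))
--                 current.clear()
--             tokens.append(char)
--             continue
--         current.append(char)
--     if current:
--         tokens.append("".join(current))
--     return tokens
-- ===== SOURCE B (Python) =====
-- def _tokenize_rule(rule: str) -> list[str]: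
--     return rule.replace("(", " ( ").replace(")", " ) ").split()
-- ===== Notes on version B (the rewrite author's own statement) =====
-- stated objective: simpler
-- what changed: Replaces the per-character accumulator loop by padding each parenthesis with spaces via str.replace and splitting on whitespace (str.split() uses the same whitespace predicate as char.isspace()).
import Mathlib
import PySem

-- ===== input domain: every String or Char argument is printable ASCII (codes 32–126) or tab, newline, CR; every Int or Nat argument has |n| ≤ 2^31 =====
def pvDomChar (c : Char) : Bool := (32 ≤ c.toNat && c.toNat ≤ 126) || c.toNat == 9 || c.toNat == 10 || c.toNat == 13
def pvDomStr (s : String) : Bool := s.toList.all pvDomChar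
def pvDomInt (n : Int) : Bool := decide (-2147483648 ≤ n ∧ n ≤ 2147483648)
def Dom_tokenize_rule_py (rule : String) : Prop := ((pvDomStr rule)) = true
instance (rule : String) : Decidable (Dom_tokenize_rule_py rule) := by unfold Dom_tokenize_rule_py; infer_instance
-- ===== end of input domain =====

-- B replaces A's per-character accumulator loop by padding parentheses with spaces and splitting on whitespace (simpler).

-- ===== PORT A =====
-- one loop iteration of A: state = (tokens, current)
def tokStep (st : List String × List Char) (c : Char) : List String × List Char :=
  if PySem.Chars.isspace c then
    if st.2.isEmpty then st else (st.1 ++ [String.ofList st.2], [])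
  else if c = '(' ∨ c = ')' then
    ((if st.2.isEmpty then st.1 else st.1 ++ [String.ofList st.2]) ++ [String.ofList [c]], [])
  else (st.1, st.2 ++ [c])

def tokenize_rule_py (rule : String) : List String :=
  let st := rule.toList.foldl tokStep ([], [])
  if st.2.isEmpty then st.1 else st.1 ++ [String.ofList st.2]

-- ===== PORT B =====
def tokenize_rule_py_alt (rule : String) : List String :=
  PySem.Str.split₀ (PySem.Str.replace (PySem.Str.replace rule "(" " ( ") ")" " ) ")

-- ===== PRECONDITION & SPEC =====
def Spec_tokenize_rule_py (rule : String) (out : List String) : Prop := out = tokenize_rule_py_alt rule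
instance (rule : String) (out : List String) : Decidable (Spec_tokenize_rule_py rule out) := by unfold Spec_tokenize_rule_py; infer_instance

-- ===== CLAIM (what is proved, stated in full; the proofs are below) =====
def Claim_equal_tokenize_rule_py : Prop := ∀ (rule : String), Dom_tokenize_rule_py rule → Spec_tokenize_rule_py rule (tokenize_rule_py rule)

-- ===== LEMMAS AND PROOFS =====

-- replace with a single-character pattern is a flatMap
theorem replace_go_single (o : Char) (new : List Char) :
    ∀ (l : List Char) (fuel : Nat) (acc : List Char), l.length ≤ fuel →
      PySem.Chars.replace.go [o] new fuel l acc
        = acc.reverse ++ l.flatMap (fun c => if c = o then new else [c]) := by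
  intro l
  induction l with
  | nil =>
      intro fuel acc _
      cases fuel <;> simp [PySem.Chars.replace.go]
  | cons c t ih =>
      intro fuel acc h
      cases fuel with
      | zero => simp at h
      | succ f =>
          have ht : t.length ≤ f := by simpa using h
          by_cases hc : o = c
          · subst hc
            simp [PySem.Chars.replace.go, List.isPrefixOf, ih f _ ht]
          · have : (o == c) = false := by simp [hc]
            simp [PySem.Chars.replace.go, List.isPrefixOf, this, ih f _ ht, Ne.symm hc]

theorem replace_single (o : Char) (new s : List Char) :
    PySem.Chars.replace s [o] new = s.flatMap (fun c => if c = o then new else [c]) := by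
  simp [PySem.Chars.replace, replace_go_single o new s s.length [] (le_refl _)]

-- the combined effect of the two replaces, character by character
def padParen (c : Char) : List Char :=
  if c = '(' then [' ', '(', ' '] else if c = ')' then [' ', ')', ' '] else [c]

theorem double_replace (r : List Char) :
    (r.flatMap (fun c => if c = '(' then [' ', '(', ' '] else [c])).flatMap
        (fun c => if c = ')' then [' ', ')', ' '] else [c])
      = r.flatMap padParen := by
  induction r with
  | nil => simp
  | cons c t ih =>
      by_cases h1 : c = '('
      · subst h1; simp [padParen, ih]
      · by_cases h2 : c = ')'
        · subst h2; simp [padParen, ih]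
        · simp [padParen, h1, h2, ih]

-- split₀.go over the padded stream simulates A's fold
theorem go_simulates :
    ∀ (r current : List Char) (tokens : List String),
      (PySem.Chars.split₀.go (r.flatMap padParen) current.reverse
          (tokens.reverse.map String.toList)).map String.ofList
        = (let st := r.foldl tokStep (tokens, current);
           if st.2.isEmpty then st.1 else st.1 ++ [String.ofList st.2]) := by
  intro r
  induction r with
  | nil =>
      intro current tokens
      by_cases h : current.isEmpty
      · simp_all [PySem.Chars.split₀.go, Function.comp_def]
      · simp_all [PySem.Chars.split₀.go, Function.comp_def]
  | cons c t ih =>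
      intro current tokens
      have s1 : PySem.Chars.isspace ' ' = true := by decide
      have s2 : PySem.Chars.isspace '(' = false := by decide
      have s3 : PySem.Chars.isspace ')' = false := by decide
      have t1 : ("(" : String).toList = ['('] := by decide
      have t2 : (")" : String).toList = [')'] := by decide
      by_cases hsp : PySem.Chars.isspace c = true
      · have hnp1 : c ≠ '(' := by rintro rfl; simp [s2] at hsp
        have hnp2 : c ≠ ')' := by rintro rfl; simp [s3] at hsp
        by_cases h : current.isEmpty
        · have hc : current = [] := by simpa [List.isEmpty_iff] using h
          subst hc
          simpa [padParen, hnp1, hnp2, PySem.Chars.split₀.go, hsp, tokStep] using ih [] tokens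
        · simpa [padParen, hnp1, hnp2, PySem.Chars.split₀.go, hsp, tokStep, h] using
            ih [] (tokens ++ [String.ofList current])
      · by_cases h1 : c = '('
        · subst h1
          by_cases h : current.isEmpty
          · have hc : current = [] := by simpa [List.isEmpty_iff] using h
            subst hc
            simpa [padParen, PySem.Chars.split₀.go, tokStep, s1, s2, t1] using
              ih [] (tokens ++ [String.ofList ['(']])
          · simpa [padParen, PySem.Chars.split₀.go, tokStep, s1, s2, t1, h] using
              ih [] ((tokens ++ [String.ofList current]) ++ [String.ofList ['(']])
        · by_cases h2 : c = ')'
          · subst h2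
            by_cases h : current.isEmpty
            · have hc : current = [] := by simpa [List.isEmpty_iff] using h
              subst hc
              simpa [padParen, PySem.Chars.split₀.go, tokStep, s1, s3, t2] using
                ih [] (tokens ++ [String.ofList [')']])
            · simpa [padParen, PySem.Chars.split₀.go, tokStep, s1, s3, t2, h] using
                ih [] ((tokens ++ [String.ofList current]) ++ [String.ofList [')']])
          · simpa [padParen, h1, h2, PySem.Chars.split₀.go, hsp, tokStep] using
              ih (current ++ [c]) tokens

-- ===== VERDICT (by name: the statement is the Claim_ definition above) =====
theorem tokenize_rule_py_spec : Claim_equal_tokenize_rule_py := by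
  intro rule _
  unfold Spec_tokenize_rule_py tokenize_rule_py tokenize_rule_py_alt
  have hB : PySem.Str.split₀ (PySem.Str.replace (PySem.Str.replace rule "(" " ( ") ")" " ) ")
      = (PySem.Chars.split₀ ((rule.toList.flatMap padParen))).map String.ofList := by
    simp only [PySem.Str.split₀, PySem.Str.toList_replace]
    have h1 : ("(" : String).toList = ['('] := by decide
    have h2 : (")" : String).toList = [')'] := by decide
    have h3 : (" ( " : String).toList = [' ', '(', ' '] := by decide
    have h4 : (" ) " : String).toList = [' ', ')', ' '] := by decide
    rw [h1, h2, h3, h4, replace_single, replace_single, double_replace]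
  rw [hB]
  have := go_simulates rule.toList [] []
  simp only [List.reverse_nil, List.map_nil] at this
  simpa [PySem.Chars.split₀] using this.symm
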